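-- pv_equiv track=rewrite | github.com/Angel888/suanfa | shu-zu-zhong-shu-zi-chu-xian-de-ci-shu-lcof.py | singleNumbers
-- ===== SOURCE A (Python) =====
-- import functools
--
-- def singleNumbers(nums) :
--     ret = functools.reduce(lambda x, y: x ^ y, nums)  # 异或的结果是只剩下出现一次的数
--     div = 1
--     while div & ret == 0:  # mask这个位号表示的是那两个不重复数的二进制
--         div <<= 1
--     a, b = 0, 0
--     for n in nums:
--         if n & div:
--             a ^= n
--         else:
--             b ^= n
--     return [a, b]
-- ===== SOURCE B (Python) =====
-- def singleNumbers(nums):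
--     # count occurrences, then xor only the odd-count values (even-count values cancel anyway)
--     cnt = {}
--     for n in nums:
--         cnt[n] = cnt.get(n, 0) + 1
--     ret = 0
--     for v, c in cnt.items():
--         if c % 2:
--             ret ^= v
--     lb = 1
--     while not (ret & lb):
--         lb <<= 1
--     a = 0
--     for v, c in cnt.items():
--         if c % 2 and v & lb:
--             a ^= v
--     return [a, a ^ ret]
-- ===== Notes on version B (the rewrite author's own statement) =====
-- stated objective: alternative
-- what changed: B replaces A's two XOR-accumulator passes over nums by building an occurrence dict once, xoring only the odd-count distinct values (even counts cancel), and deriving the second output algebraically as a ^ ret instead of accumulating it in the loop.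
import Mathlib
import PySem

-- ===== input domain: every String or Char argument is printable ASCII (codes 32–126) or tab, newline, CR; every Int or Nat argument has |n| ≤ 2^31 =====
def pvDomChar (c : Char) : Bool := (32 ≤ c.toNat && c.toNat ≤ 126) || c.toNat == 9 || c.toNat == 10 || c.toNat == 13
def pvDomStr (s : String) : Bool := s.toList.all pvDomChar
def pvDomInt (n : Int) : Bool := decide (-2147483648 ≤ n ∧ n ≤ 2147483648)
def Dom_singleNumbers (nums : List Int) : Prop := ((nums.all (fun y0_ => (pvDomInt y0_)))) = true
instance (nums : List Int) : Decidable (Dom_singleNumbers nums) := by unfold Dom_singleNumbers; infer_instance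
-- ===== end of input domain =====

-- B counts occurrences in a dict and xors only the odd-count values (deriving b as a ^ ret) instead of A's two XOR passes over nums; same return value (alternative decomposition, not claimed faster).


-- ===== PORT A =====
-- 'while div & ret == 0: div <<= 1'; fuel ret.natAbs+1 always suffices when ret ≠ 0
-- (the lowest set bit 2^k of ret has k < |ret|+1); ret = 0 is excluded by Pre_ (the Python loop diverges).
def pyFindDivA (ret : Int) (dv : Int) : Nat → Int
  | 0 => dv
  | fuel+1 => if PySem.Int.band dv ret == 0 then pyFindDivA ret (dv <<< 1) fuel else dv

def singleNumbers (nums : List Int) : List Int :=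
  match nums with
  | [] => []  -- unreachable: functools.reduce raises TypeError on []; excluded by Pre_
  | x :: rest =>
    let ret := rest.foldl (fun s n => PySem.Int.bxor s n) x
    let dv := pyFindDivA ret 1 (ret.natAbs + 1)
    let ab := nums.foldl
      (fun (p : Int × Int) n =>
        if PySem.Int.band n dv ≠ 0 then (PySem.Int.bxor p.1 n, p.2)
        else (p.1, PySem.Int.bxor p.2 n)) ((0 : Int), (0 : Int))
    [ab.1, ab.2]

-- ===== PORT B =====
-- 'while not (ret & lb): lb <<= 1' from Source B; same fuel bound as A's loop, see above.
def pyFindDivB (ret : Int) (lb : Int) : Nat → Int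
  | 0 => lb
  | fuel+1 => if PySem.Int.band ret lb == 0 then pyFindDivB ret (lb <<< 1) fuel else lb

def singleNumbers_alt (nums : List Int) : List Int :=
  let cnt := nums.foldl (fun d n => d.insert n (d.getD n 0 + 1)) (PySem.Dict.empty : PySem.Dict Int Int)
  let ret := cnt.items.foldl
    (fun s vc => if PySem.Int.mod vc.2 2 ≠ 0 then PySem.Int.bxor s vc.1 else s) (0 : Int)
  let lb := pyFindDivB ret 1 (ret.natAbs + 1)
  let a := cnt.items.foldl
    (fun s vc => if PySem.Int.mod vc.2 2 ≠ 0 ∧ PySem.Int.band vc.1 lb ≠ 0 then PySem.Int.bxor s vc.1 else s) (0 : Int)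
  [a, PySem.Int.bxor a ret]

-- ===== PRECONDITION & SPEC =====
-- Pre_ excludes exactly the inputs where the Python A returns nothing: the empty list
-- (functools.reduce raises TypeError) and lists whose total xor is 0 (A's 'while div & ret == 0'
-- loop never terminates); B diverges on the same inputs.
def Pre_singleNumbers (nums : List Int) : Prop :=
  nums ≠ [] ∧ nums.foldl (fun s n => PySem.Int.bxor s n) 0 ≠ 0
instance (nums : List Int) : Decidable (Pre_singleNumbers nums) := by unfold Pre_singleNumbers; infer_instance

def pvWitness_singleNumbers : List Int := [4, 1, 4, 6]

def Spec_singleNumbers (nums : List Int) (out : List Int) : Prop := out = singleNumbers_alt nums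
instance (nums : List Int) (out : List Int) : Decidable (Spec_singleNumbers nums out) := by unfold Spec_singleNumbers; infer_instance

-- ===== CLAIM (what is proved, stated in full; the proofs are below) =====
def Claim_equal_singleNumbers : Prop := ∀ (nums : List Int), Dom_singleNumbers nums → Pre_singleNumbers nums → Spec_singleNumbers nums (singleNumbers nums)

-- ===== LEMMAS AND PROOFS =====

-- two's-complement decoding: every Int is pyDec s m, and bxor acts componentwise
def pyDec (s : Bool) (m : Nat) : Int := if s then -(m : Int) - 1 else (m : Int)

theorem exists_pyDec (a : Int) : ∃ s m, a = pyDec s m := by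
  cases a with
  | ofNat m => exact ⟨false, m, by simp [pyDec]⟩
  | negSucc m => exact ⟨true, m, by simp [pyDec, Int.negSucc_eq]; ring⟩

theorem bxor_pyDec (s t : Bool) (m k : Nat) :
    PySem.Int.bxor (pyDec s m) (pyDec t k) = pyDec (xor s t) (m ^^^ k) := by
  cases s <;> cases t <;>
    simp [pyDec, PySem.Int.bxor] <;>
    (first
      | (intro h; exact absurd h (by omega))
      | (rw [if_neg (by omega), if_neg (by omega)]))

theorem bxor_assoc (a b c : Int) :
    PySem.Int.bxor (PySem.Int.bxor a b) c = PySem.Int.bxor a (PySem.Int.bxor b c) := by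
  obtain ⟨s, m, rfl⟩ := exists_pyDec a
  obtain ⟨t, k, rfl⟩ := exists_pyDec b
  obtain ⟨u, j, rfl⟩ := exists_pyDec c
  rw [bxor_pyDec, bxor_pyDec, bxor_pyDec, bxor_pyDec, Bool.xor_assoc, Nat.xor_assoc]

theorem zero_bxor (a : Int) : PySem.Int.bxor 0 a = a := by
  rw [PySem.Int.bxor_comm]; exact PySem.Int.bxor_zero a

theorem bxor_left_comm (a b c : Int) :
    PySem.Int.bxor a (PySem.Int.bxor b c) = PySem.Int.bxor b (PySem.Int.bxor a c) := by
  rw [← bxor_assoc, PySem.Int.bxor_comm a b, bxor_assoc]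

theorem bxor_cancel (a b : Int) : PySem.Int.bxor a (PySem.Int.bxor a b) = b := by
  rw [← bxor_assoc, PySem.Int.bxor_self, zero_bxor]

-- the generic xor-if fold both programs' loops instantiate
def xorIf {β : Type} (c : β → Prop) [DecidablePred c] (g : β → Int) (s : Int) (l : List β) : Int :=
  l.foldl (fun s y => if c y then PySem.Int.bxor s (g y) else s) s

theorem xorIf_acc {β : Type} (c : β → Prop) [DecidablePred c] (g : β → Int) (l : List β) (s : Int) :
    xorIf c g s l = PySem.Int.bxor s (xorIf c g 0 l) := by
  induction l generalizing s with
  | nil => simp [xorIf]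
  | cons h t ih =>
    simp only [xorIf, List.foldl_cons] at *
    rw [ih, ih (if c h then PySem.Int.bxor 0 (g h) else 0)]
    by_cases hc : c h <;> simp [hc, zero_bxor, bxor_assoc]

theorem xorIf_append {β : Type} (c : β → Prop) [DecidablePred c] (g : β → Int) (u v : List β) :
    xorIf c g 0 (u ++ v) = PySem.Int.bxor (xorIf c g 0 u) (xorIf c g 0 v) := by
  simp only [xorIf, List.foldl_append]
  exact xorIf_acc c g v _

theorem xorIf_cons {β : Type} (c : β → Prop) [DecidablePred c] (g : β → Int) (e : β) (v : List β) :
    xorIf c g 0 (e :: v) = PySem.Int.bxor (if c e then g e else 0) (xorIf c g 0 v) := by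
  simp only [xorIf, List.foldl_cons]
  rw [show (if c e then PySem.Int.bxor 0 (g e) else (0 : Int)) = (if c e then g e else 0) by
        by_cases hc : c e <;> simp [hc, zero_bxor]] at *
  exact xorIf_acc c g v _

theorem xorIf_singleton {β : Type} (c : β → Prop) [DecidablePred c] (g : β → Int) (e : β) :
    xorIf c g 0 [e] = if c e then g e else 0 := by
  rw [xorIf_cons]
  simp [xorIf, PySem.Int.bxor_zero]

theorem xorIf_congr {β : Type} (c c' : β → Prop) [DecidablePred c] [DecidablePred c']
    (g : β → Int) (l : List β) (s : Int) (h : ∀ y ∈ l, c y ↔ c' y) :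
    xorIf c g s l = xorIf c' g s l := by
  induction l generalizing s with
  | nil => rfl
  | cons e t ih =>
    simp only [xorIf, List.foldl_cons]
    have he : c e ↔ c' e := h e (List.mem_cons_self ..)
    have : (if c e then PySem.Int.bxor s (g e) else s) = (if c' e then PySem.Int.bxor s (g e) else s) := by
      by_cases hc : c e
      · rw [if_pos hc, if_pos (he.mp hc)]
      · rw [if_neg hc, if_neg (fun hc' => hc (he.mpr hc'))]
    rw [this]
    exact ih _ (fun y hy => h y (List.mem_cons_of_mem _ hy))

theorem xorIf_true (l : List Int) :
    xorIf (fun _ => True) id 0 l = l.foldl (fun s n => PySem.Int.bxor s n) 0 := by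
  simp [xorIf]

-- A's single pass with a pair accumulator is the two xorIf folds
theorem pair_fold (dv : Int) (l : List Int) (a0 b0 : Int) :
    l.foldl
      (fun (p : Int × Int) n =>
        if PySem.Int.band n dv ≠ 0 then (PySem.Int.bxor p.1 n, p.2)
        else (p.1, PySem.Int.bxor p.2 n)) (a0, b0)
    = (xorIf (fun n => PySem.Int.band n dv ≠ 0) id a0 l,
       xorIf (fun n => ¬ PySem.Int.band n dv ≠ 0) id b0 l) := by
  induction l generalizing a0 b0 with
  | nil => simp [xorIf]
  | cons h t ih =>
    simp only [List.foldl_cons, xorIf, id]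
    by_cases hc : PySem.Int.band h dv ≠ 0
    · rw [if_pos hc, if_pos hc, if_neg (not_not_intro hc)]
      exact ih _ _
    · rw [if_neg hc, if_neg hc, if_pos hc]
      exact ih _ _

-- the two halves xor back to the whole
theorem xorIf_split (c : Int → Prop) [DecidablePred c] (l : List Int) :
    PySem.Int.bxor (xorIf c id 0 l) (xorIf (fun n => ¬ c n) id 0 l)
      = xorIf (fun _ => True) id 0 l := by
  induction l with
  | nil => simp [xorIf]
  | cons h t ih =>
    rw [xorIf_cons, xorIf_cons, xorIf_cons]
    by_cases hc : c h <;>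
      simp only [hc, not_true, not_false_iff, if_pos trivial, id] <;>
      rw [← ih] <;>
      simp [zero_bxor, bxor_assoc, bxor_left_comm]

-- the key lemma: folding xor-if over the counter's items equals folding it over the list itself
theorem counter_xor (p : Int → Prop) [DecidablePred p] (l : List Int) :
    xorIf (fun vc : Int × Int => PySem.Int.mod vc.2 2 ≠ 0 ∧ p vc.1) Prod.fst 0
      ((PySem.Set.ofList l).map (fun k => (k, (l.count k : Int))))
    = xorIf p id 0 l := by
  induction l using List.reverseRecOn with
  | nil => rfl
  | append_singleton l x ih =>
    have hof : PySem.Set.ofList (l ++ [x]) = PySem.Set.add (PySem.Set.ofList l) x := by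
      rw [PySem.Set.ofList_eq_foldl, PySem.Set.ofList_eq_foldl, List.foldl_append, List.foldl_cons,
        List.foldl_nil]
    have hrhs : xorIf p id 0 (l ++ [x])
        = PySem.Int.bxor (xorIf p id 0 l) (if p x then x else 0) := by
      rw [xorIf_append, xorIf_singleton]; simp
    rw [hof, hrhs]
    by_cases hx : x ∈ l
    · -- x already occurs: the set is unchanged, the count of x flips parity
      rw [PySem.Set.add_of_mem ((PySem.Set.mem_ofList ..).mpr hx)]
      obtain ⟨s1, s2, hsplit⟩ := List.append_of_mem ((PySem.Set.mem_ofList ..).mpr hx)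
      have hnd : (s1 ++ x :: s2).Nodup := hsplit ▸ PySem.Set.nodup_ofList l
      have hxs12 : x ∉ s1 ∧ x ∉ s2 := by
        have h := hnd
        simp [List.nodup_append, List.nodup_cons] at h
        exact ⟨fun hmem => (h.2.2 x hmem).1 rfl, h.2.1.1⟩
      rw [hsplit] at ih ⊢
      rw [List.map_append, List.map_cons] at ih ⊢
      have hs1 : s1.map (fun k => (k, ((l ++ [x]).count k : Int)))
          = s1.map (fun k => (k, (l.count k : Int))) := by
        apply List.map_congr_left
        intro k hk
        have hkx : ¬ (x = k) := fun h => hxs12.1 (h ▸ hk)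
        simp [List.count_append, hkx]
      have hs2 : s2.map (fun k => (k, ((l ++ [x]).count k : Int)))
          = s2.map (fun k => (k, (l.count k : Int))) := by
        apply List.map_congr_left
        intro k hk
        have hkx : ¬ (x = k) := fun h => hxs12.2 (h ▸ hk)
        simp [List.count_append, hkx]
      rw [hs1, hs2]
      have hcx : ((l ++ [x]).count x : Int) = (l.count x : Int) + 1 := by
        simp [List.count_append]
      rw [hcx]
      rw [xorIf_append, xorIf_cons] at ih ⊢
      dsimp only at ih ⊢
      rw [← ih]
      have h1 : PySem.Int.mod ((l.count x : Nat) : Int) 2 = (((l.count x) % 2 : Nat) : Int) := by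
        exact_mod_cast PySem.Int.mod_natCast (l.count x) 2
      have h2 : PySem.Int.mod ((l.count x : Int) + 1) 2 = ((((l.count x) + 1) % 2 : Nat) : Int) := by
        have hc : ((l.count x : Int) + 1) = (((l.count x + 1 : Nat)) : Int) := by push_cast; ring
        rw [hc]
        exact_mod_cast PySem.Int.mod_natCast (l.count x + 1) 2
      by_cases hp : p x
      · by_cases hm : (l.count x) % 2 = 0
        · rw [if_pos ⟨by rw [h2]; omega, hp⟩,
            if_neg (fun hcon => hcon.1 (by rw [h1]; omega)), if_pos hp]
          simp [zero_bxor, bxor_left_comm, PySem.Int.bxor_comm]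
        · rw [if_neg (fun hcon => hcon.1 (by rw [h2]; omega)),
            if_pos ⟨by rw [h1]; omega, hp⟩, if_pos hp]
          simp [zero_bxor, PySem.Int.bxor_comm, bxor_left_comm, bxor_cancel]
      · rw [if_neg (fun hcon => hp hcon.2), if_neg (fun hcon => hp hcon.2), if_neg hp]
        simp [PySem.Int.bxor_zero]
    · -- x is new: the set gains a final element of count 1
      have hxs : x ∉ PySem.Set.ofList l := fun h => hx ((PySem.Set.mem_ofList ..).mp h)
      rw [PySem.Set.add_of_not_mem hxs, List.map_append]
      have hmap : (PySem.Set.ofList l).map (fun k => (k, ((l ++ [x]).count k : Int)))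
          = (PySem.Set.ofList l).map (fun k => (k, (l.count k : Int))) := by
        apply List.map_congr_left
        intro k hk
        have hkx : ¬ (x = k) := fun h => hx (h ▸ (PySem.Set.mem_ofList ..).mp hk)
        simp [List.count_append, hkx]
      have hx1 : [x].map (fun k => (k, ((l ++ [x]).count k : Int))) = [(x, 1)] := by
        simp [List.count_append, List.count_eq_zero.mpr hx]
      rw [hmap, hx1, xorIf_append, xorIf_singleton, ih]
      have h12 : PySem.Int.mod (1 : Int) 2 = 1 := by decide
      by_cases hp : p x
      · rw [if_pos ⟨by rw [h12]; decide, hp⟩, if_pos hp]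
      · rw [if_neg (fun h => hp h.2), if_neg hp]

-- the two find-div loops are the same function
theorem findDiv_eq (r d : Int) (f : Nat) : pyFindDivA r d f = pyFindDivB r d f := by
  induction f generalizing d with
  | zero => rfl
  | succ f ih =>
    simp only [pyFindDivA, pyFindDivB, PySem.Int.band_comm d r]
    by_cases h : PySem.Int.band r d == 0 <;> simp [h, ih]

theorem counter_xor_true (l : List Int) :
    xorIf (fun vc : Int × Int => PySem.Int.mod vc.2 2 ≠ 0) Prod.fst 0
      ((PySem.Set.ofList l).map (fun k => (k, (l.count k : Int))))
    = l.foldl (fun s n => PySem.Int.bxor s n) 0 := by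
  rw [show xorIf (fun vc : Int × Int => PySem.Int.mod vc.2 2 ≠ 0) Prod.fst 0
        ((PySem.Set.ofList l).map (fun k => (k, (l.count k : Int))))
      = xorIf (fun vc : Int × Int => PySem.Int.mod vc.2 2 ≠ 0 ∧ True) Prod.fst 0
        ((PySem.Set.ofList l).map (fun k => (k, (l.count k : Int))))
      from xorIf_congr _ _ _ _ _ (fun y _ => by simp)]
  rw [counter_xor (fun _ => True) l, xorIf_true]

theorem counter_xor_band (w : Int) (l : List Int) :
    xorIf (fun vc : Int × Int => PySem.Int.mod vc.2 2 ≠ 0 ∧ PySem.Int.band vc.1 w ≠ 0) Prod.fst 0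
      ((PySem.Set.ofList l).map (fun k => (k, (l.count k : Int))))
    = xorIf (fun n => PySem.Int.band n w ≠ 0) id 0 l :=
  counter_xor (fun v => PySem.Int.band v w ≠ 0) l

-- reading each port's fold as the generic xorIf (definitional)
theorem b_ret_fold (L : List (Int × Int)) :
    L.foldl (fun s vc => if PySem.Int.mod vc.2 2 ≠ 0 then PySem.Int.bxor s vc.1 else s) (0 : Int)
    = xorIf (fun vc : Int × Int => PySem.Int.mod vc.2 2 ≠ 0) Prod.fst 0 L := rfl

theorem b_a_fold (w : Int) (L : List (Int × Int)) :
    L.foldl (fun s vc =>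
        if PySem.Int.mod vc.2 2 ≠ 0 ∧ PySem.Int.band vc.1 w ≠ 0 then PySem.Int.bxor s vc.1 else s)
      (0 : Int)
    = xorIf (fun vc : Int × Int => PySem.Int.mod vc.2 2 ≠ 0 ∧ PySem.Int.band vc.1 w ≠ 0)
        Prod.fst 0 L := rfl

-- ===== VERDICT (by name: the statement is the Claim_ definition above) =====
theorem singleNumbers_spec : Claim_equal_singleNumbers := by
  unfold Claim_equal_singleNumbers
  intro nums _dom hpre
  unfold Spec_singleNumbers
  obtain ⟨hne, -⟩ := hpre
  cases nums with
  | nil => exact absurd rfl hne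
  | cons x rest =>
    simp only [singleNumbers, singleNumbers_alt]
    rw [pair_fold]
    dsimp only
    rw [PySem.Dict.foldl_insert_getD_add_one_eq_counter, PySem.Dict.items_counter]
    rw [b_ret_fold, counter_xor_true, List.foldl_cons, zero_bxor]
    rw [← findDiv_eq]
    rw [b_a_fold, counter_xor_band]
    generalize pyFindDivA (rest.foldl (fun s n => PySem.Int.bxor s n) x) 1
      ((rest.foldl (fun s n => PySem.Int.bxor s n) x).natAbs + 1) = d
    have hsp := xorIf_split (fun n => PySem.Int.band n d ≠ 0) (x :: rest)
    rw [xorIf_true, List.foldl_cons, zero_bxor] at hsp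
    rw [← hsp, bxor_cancel]
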